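-- pv_equiv track=rewrite | github.com/SongMY01/Algorithm | 프로그래머스/2/138476. 귤 고르기/귤 고르기.py | solution
-- ===== SOURCE A (Python) =====
-- from collections import Counter
--
-- def solution(k, tangerine):
--     # 크기별 개수 세기
--     counter = Counter(tangerine)
--
--     # 개수가 많은 순으로 정렬
--     counts = sorted(counter.values(), reverse=True)
--
--     # 누적합으로 k개 채울 때까지 종류 세기
--     total = 0
--     kinds = 0
--     for c in counts:
--         total += c
--         kinds += 1
--         if total >= k:
--             break
--     return kinds
-- ===== SOURCE B (Python) =====
-- from collections import Counter
--
-- def solution(k, tangerine):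
--     # Bucket/counting approach: histogram of group sizes, walk sizes from max down.
--     if not tangerine:
--         return 0
--     counter = Counter(tangerine)
--     freq = Counter(counter.values())
--     total = 0
--     kinds = 0
--     c = max(counter.values())
--     while c >= 1:
--         for _ in range(freq[c]):
--             total += c
--             kinds += 1
--             if total >= k:
--                 return kinds
--         c -= 1
--     return kinds
-- ===== Notes on version B (the rewrite author's own statement) =====
-- stated objective: alternative
-- what changed: Replaces the comparison sort of the group sizes by a second histogram (size -> number of kinds with that size) walked from the maximum size downwards, with an early return the moment the running total reaches k.
import Mathlib
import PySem

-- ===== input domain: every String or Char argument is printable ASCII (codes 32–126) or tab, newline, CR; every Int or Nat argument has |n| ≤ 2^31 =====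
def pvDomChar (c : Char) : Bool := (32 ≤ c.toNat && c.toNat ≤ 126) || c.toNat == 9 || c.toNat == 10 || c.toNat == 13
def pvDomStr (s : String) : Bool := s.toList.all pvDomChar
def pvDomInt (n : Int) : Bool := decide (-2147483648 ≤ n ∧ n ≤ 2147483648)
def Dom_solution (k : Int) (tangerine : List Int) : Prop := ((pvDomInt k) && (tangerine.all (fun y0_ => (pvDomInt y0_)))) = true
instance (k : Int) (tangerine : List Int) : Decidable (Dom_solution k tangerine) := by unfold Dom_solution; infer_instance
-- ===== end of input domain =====

-- B replaces the comparison sort of the group sizes by a second histogram (size -> number of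
-- kinds) walked from the maximum size downwards, returning as soon as the total reaches k
-- (alternative decomposition; same return value).

-- ===== PORT A =====
def solution (k : Int) (tangerine : List Int) : Int :=
  let counter := PySem.Dict.counter tangerine
  let counts := PySem.List.sorted counter.values (fun v => v) true
  let r := counts.foldl (fun (s : Int × Int × Bool) c =>
    if s.2.2 then s                              -- after 'break': state frozen
    else
      let total := s.1 + c
      let kinds := s.2.1 + 1
      (total, kinds, decide (total ≥ k))) ((0 : Int), (0 : Int), false)
  r.2.1

-- ===== PORT B =====
-- inner 'for _ in range(freq[c])' with early return (flag = returned)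
def solAltInner (k c : Int) : Nat → Int → Int → Int × Int × Bool
  | 0, total, kinds => (total, kinds, false)
  | n+1, total, kinds =>
    let total' := total + c
    let kinds' := kinds + 1
    if total' ≥ k then (total', kinds', true)
    else solAltInner k c n total' kinds'

-- outer 'while c >= 1' loop
def solAltOuter (k : Int) (freq : PySem.Dict Int Int) (c total kinds : Int) : Int :=
  if h : 1 ≤ c then
    let r := solAltInner k c ((freq.getD c 0).toNat) total kinds
    if r.2.2 then r.2.1
    else solAltOuter k freq (c - 1) r.1 r.2.1
  else kinds
termination_by c.toNat
decreasing_by omega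

def solution_alt (k : Int) (tangerine : List Int) : Int :=
  if tangerine = [] then 0
  else
    let counter := PySem.Dict.counter tangerine
    let freq := PySem.Dict.counter counter.values
    match PySem.List.max? counter.values (fun v => v) with
    | none => 0   -- unreachable: tangerine ≠ [] gives a nonempty values list
    | some m => solAltOuter k freq m 0 0

-- ===== PRECONDITION & SPEC =====
def Spec_solution (k : Int) (tangerine : List Int) (out : Int) : Prop := out = solution_alt k tangerine
instance (k : Int) (tangerine : List Int) (out : Int) : Decidable (Spec_solution k tangerine out) := by unfold Spec_solution; infer_instance

-- ===== CLAIM (what is proved, stated in full; the proofs are below) =====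
def Claim_equal_solution : Prop := ∀ (k : Int) (tangerine : List Int), Dom_solution k tangerine → Spec_solution k tangerine (solution k tangerine)

-- ===== LEMMAS AND PROOFS =====

-- Reference loop: consume the list of group sizes, stopping (flag true) when total ≥ k.
def pvRun (k : Int) : List Int → Int → Int → Int × Int × Bool
  | [], t, n => (t, n, false)
  | c :: rest, t, n =>
    if t + c ≥ k then (t + c, n + 1, true) else pvRun k rest (t + c) (n + 1)

-- The descending multiset of group sizes n, n-1, ..., 1, each repeated its multiplicity in vs.
def pvFlat (vs : List Int) : Nat → List Int
  | 0 => []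
  | n+1 => List.replicate (vs.count ((n : Int) + 1)) ((n : Int) + 1) ++ pvFlat vs n

theorem pvFoldl_frozen (k : Int) (L : List Int) (s : Int × Int × Bool) (hs : s.2.2 = true) :
    L.foldl (fun (s : Int × Int × Bool) c =>
      if s.2.2 then s
      else
        let total := s.1 + c
        let kinds := s.2.1 + 1
        (total, kinds, decide (total ≥ k))) s = s := by
  induction L with
  | nil => rfl
  | cons c rest ih => simp [List.foldl, hs, ih]

theorem pvFoldl_eq_run (k : Int) (L : List Int) (t n : Int) :
    L.foldl (fun (s : Int × Int × Bool) c =>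
      if s.2.2 then s
      else
        let total := s.1 + c
        let kinds := s.2.1 + 1
        (total, kinds, decide (total ≥ k))) (t, n, false) = pvRun k L t n := by
  induction L generalizing t n with
  | nil => rfl
  | cons c rest ih =>
    simp only [List.foldl, pvRun]
    by_cases h : t + c ≥ k
    · simp [h, pvFoldl_frozen]
    · simp [h, ih]

theorem pvRun_append (k : Int) (L1 L2 : List Int) (t n : Int) :
    pvRun k (L1 ++ L2) t n =
      (if (pvRun k L1 t n).2.2 then pvRun k L1 t n
       else pvRun k L2 (pvRun k L1 t n).1 (pvRun k L1 t n).2.1) := by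
  induction L1 generalizing t n with
  | nil => simp [pvRun]
  | cons c rest ih =>
    simp only [List.cons_append, pvRun]
    by_cases h : t + c ≥ k <;> simp [h, ih]

theorem pvInner_eq_run (k c : Int) (n : Nat) (t m : Int) :
    solAltInner k c n t m = pvRun k (List.replicate n c) t m := by
  induction n generalizing t m with
  | zero => rfl
  | succ n ih =>
    simp only [solAltInner, List.replicate, pvRun]
    by_cases h : t + c ≥ k <;> simp [h, ih]

theorem pvOuter_eq_run (k : Int) (vs : List Int) (c t n : Int) :
    solAltOuter k (PySem.Dict.counter vs) c t n = (pvRun k (pvFlat vs c.toNat) t n).2.1 := by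
  by_cases h : 1 ≤ c
  · have hc : c.toNat = (c - 1).toNat + 1 := by omega
    have hcast : ((c - 1).toNat : Int) + 1 = c := by omega
    rw [solAltOuter]
    simp only [h, dite_true]
    rw [PySem.Dict.getD_counter]
    have htn : ((vs.count c : Int)).toNat = vs.count c := by
      simp
    rw [htn, pvInner_eq_run, hc]
    simp only [pvFlat, hcast, pvRun_append]
    by_cases hdone : (pvRun k (List.replicate (vs.count c) c) t n).2.2
    · simp [hdone]
    · simp only [hdone, if_false, Bool.false_eq_true]
      have := pvOuter_eq_run k vs (c - 1)
        (pvRun k (List.replicate (vs.count c) c) t n).1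
        (pvRun k (List.replicate (vs.count c) c) t n).2.1
      simpa [hdone] using this
  · rw [solAltOuter]
    have hz : c.toNat = 0 := by omega
    simp [h, hz, pvFlat, pvRun]
termination_by c.toNat
decreasing_by omega

theorem pvMem_flat (vs : List Int) (n : Nat) (x : Int) (hx : x ∈ pvFlat vs n) :
    1 ≤ x ∧ x ≤ (n : Int) := by
  induction n with
  | zero => simp [pvFlat] at hx
  | succ n ih =>
    simp only [pvFlat, List.mem_append] at hx
    rcases hx with hx | hx
    · have := List.eq_of_mem_replicate hx
      subst this
      constructor <;> omega
    · have := ih hx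
      constructor <;> omega

theorem pvFlat_sorted (vs : List Int) (n : Nat) :
    (pvFlat vs n).Pairwise (fun a b => b ≤ a) := by
  induction n with
  | zero => simp [pvFlat]
  | succ n ih =>
    simp only [pvFlat]
    apply List.pairwise_append.2
    refine ⟨?_, ih, ?_⟩
    · apply List.pairwise_replicate.2
      simp
    · intro a ha b hb
      have := List.eq_of_mem_replicate ha
      have hbb := pvMem_flat vs n b hb
      omega

theorem pvFlat_congr (vs ws : List Int) (n : Nat)
    (h : ∀ v : Int, 1 ≤ v → v ≤ (n : Int) → vs.count v = ws.count v) :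
    pvFlat vs n = pvFlat ws n := by
  induction n with
  | zero => rfl
  | succ n ih =>
    simp only [pvFlat]
    rw [h ((n : Int) + 1) (by omega) (by omega),
      ih (fun v h1 h2 => h v h1 (by omega))]

theorem pvPerm_replicate_filter (a : Int) (l : List Int) :
    l.Perm (List.replicate (l.count a) a ++ l.filter (fun x => x ≠ a)) := by
  induction l with
  | nil => simp
  | cons b t ih =>
    by_cases hb : b = a
    · subst hb
      simpa [List.filter_cons, List.replicate_succ] using ih.cons b
    · have hcount : (b :: t).count a = t.count a := by
        simp [hb]
      have hfil : (b :: t).filter (fun x => x ≠ a) = b :: t.filter (fun x => x ≠ a) := by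
        simp [hb]
      rw [hcount, hfil]
      exact (ih.cons b).trans (List.perm_middle.symm)

theorem pvFlat_perm (n : Nat) (vs : List Int)
    (h1 : ∀ x ∈ vs, 1 ≤ x) (h2 : ∀ x ∈ vs, x ≤ (n : Int)) :
    (pvFlat vs n).Perm vs := by
  induction n generalizing vs with
  | zero =>
    cases vs with
    | nil => simp [pvFlat]
    | cons v t =>
      have := h1 v (by simp)
      have := h2 v (by simp)
      omega
  | succ n ih =>
    set a : Int := (n : Int) + 1 with ha
    set ws := vs.filter (fun x => x ≠ a) with hws
    have hcnt : ∀ v : Int, 1 ≤ v → v ≤ (n : Int) → vs.count v = ws.count v := by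
      intro v hv1 hv2
      rw [hws]
      rw [List.count_filter]
      have : v ≠ a := by omega
      simp [this]
    have hflat : pvFlat vs n = pvFlat ws n := pvFlat_congr vs ws n hcnt
    have hw1 : ∀ x ∈ ws, 1 ≤ x := fun x hx => h1 x (List.mem_of_mem_filter hx)
    have hw2 : ∀ x ∈ ws, x ≤ (n : Int) := by
      intro x hx
      have hxv := List.mem_of_mem_filter hx
      have hxa : x ≠ a := by
        have := List.of_mem_filter hx
        simpa using this
      have := h2 x hxv
      omega
    have hperm : (pvFlat ws n).Perm ws := ih ws hw1 hw2
    simp only [pvFlat, ← ha, hflat]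
    exact ((hperm.append_left _).trans (pvPerm_replicate_filter a vs).symm)

theorem pvValues_pos (tangerine : List Int) (x : Int)
    (hx : x ∈ (PySem.Dict.counter tangerine).values) : 1 ≤ x := by
  have hval : (PySem.Dict.counter tangerine).values
      = (PySem.Dict.counter tangerine).items.map (·.2) := rfl
  rw [hval, PySem.Dict.items_counter] at hx
  simp only [List.map_map, List.mem_map, Function.comp] at hx
  obtain ⟨v, hv, hvx⟩ := hx
  have hvmem : v ∈ tangerine := (PySem.Set.mem_ofList _ _).1 hv
  have : 0 < tangerine.count v := List.count_pos_iff.2 hvmem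
  omega

theorem pvSorted_eq_flat (vs : List Int) (n : Nat)
    (h1 : ∀ x ∈ vs, 1 ≤ x) (h2 : ∀ x ∈ vs, x ≤ (n : Int)) :
    PySem.List.sorted vs (fun v => v) true = pvFlat vs n := by
  have hperm : (PySem.List.sorted vs (fun v => v) true).Perm (pvFlat vs n) :=
    (PySem.List.sorted_perm vs (fun v => v) true).trans (pvFlat_perm n vs h1 h2).symm
  have hs1 : (PySem.List.sorted vs (fun v => v) true).Pairwise (fun a b : Int => b ≤ a) :=
    PySem.List.sorted_pairwise_rev vs (fun v => v)
  have hs2 : (pvFlat vs n).Pairwise (fun a b : Int => b ≤ a) := pvFlat_sorted vs n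
  exact hperm.eq_of_pairwise (fun a b _ _ h1 h2 => le_antisymm h2 h1) hs1 hs2

-- ===== VERDICT (by name: the statement is the Claim_ definition above) =====
theorem solution_spec : Claim_equal_solution := by
  intro k tangerine _
  unfold Spec_solution
  by_cases hnil : tangerine = []
  · subst hnil
    rfl
  · have hval : (PySem.Dict.counter tangerine).values ≠ [] := by
      intro hcon
      apply hnil
      have hval' : (PySem.Dict.counter tangerine).values
          = (PySem.Dict.counter tangerine).items.map (·.2) := rfl
      rw [hval', PySem.Dict.items_counter] at hcon
      cases htan : tangerine with
      | nil => rfl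
      | cons a t =>
        rw [htan] at hcon
        have : a ∈ PySem.Set.ofList (a :: t) := (PySem.Set.mem_ofList _ _).2 (by simp)
        cases hofl : PySem.Set.ofList (a :: t) with
        | nil => rw [hofl] at this; simp at this
        | cons b s => rw [hofl] at hcon; simp at hcon
    obtain ⟨m, hm⟩ : ∃ m, PySem.List.max? (PySem.Dict.counter tangerine).values (fun v => v)
        = some m := by
      cases hv : (PySem.Dict.counter tangerine).values with
      | nil => exact absurd hv hval
      | cons x t => exact ⟨t.foldl max x, PySem.List.max?_id_cons x t⟩
    have hmem : m ∈ (PySem.Dict.counter tangerine).values := PySem.List.max?_mem hm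
    have hmax : ∀ y ∈ (PySem.Dict.counter tangerine).values, y ≤ m :=
      PySem.List.max?_isMax hm
    have hpos : ∀ x ∈ (PySem.Dict.counter tangerine).values, 1 ≤ x :=
      fun x hx => pvValues_pos tangerine x hx
    have hm1 : 1 ≤ m := hpos m hmem
    have hmc : ((m.toNat : Int)) = m := by omega
    have hbound : ∀ x ∈ (PySem.Dict.counter tangerine).values, x ≤ ((m.toNat : Int)) := by
      intro x hx; rw [hmc]; exact hmax x hx
    -- A side
    show (List.foldl (fun (s : Int × Int × Bool) c =>
        if s.2.2 then s
        else
          let total := s.1 + c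
          let kinds := s.2.1 + 1
          (total, kinds, decide (total ≥ k))) ((0 : Int), (0 : Int), false)
        (PySem.List.sorted (PySem.Dict.counter tangerine).values (fun v => v) true)).2.1
      = solution_alt k tangerine
    rw [pvSorted_eq_flat _ m.toNat hpos hbound, pvFoldl_eq_run]
    -- B side
    unfold solution_alt
    simp only [hnil, if_false, hm]
    rw [pvOuter_eq_run]
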